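-- pv_equiv track=rewrite | github.com/khanhthanhdev/SteamFun | src/rag/plugin_detection.py | _assess_complexity_level
-- ===== SOURCE A (Python) =====
-- def _assess_complexity_level(context: str) -> int:
--     """Assess the complexity level of the task (1-5)"""
--     complexity_indicators = {
--         "basic": ["simple", "basic", "easy", "intro", "beginner"],
--         "intermediate": ["medium", "intermediate", "moderate"],
--         "advanced": ["complex", "advanced", "sophisticated", "detailed"],
--         "expert": ["expert", "professional", "production", "enterprise"]
--     }
--
--     context_lower = context.lower()
--
--     for level, indicators in complexity_indicators.items():
--         if any(indicator in context_lower for indicator in indicators):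
--             if level == "basic":
--                 return 1
--             elif level == "intermediate":
--                 return 3
--             elif level == "advanced":
--                 return 4
--             elif level == "expert":
--                 return 5
--
--     return 2  # Default to basic-intermediate
-- ===== SOURCE B (Python) =====
-- _LEVEL_SCORES = {
--     "simple": 1, "basic": 1, "easy": 1, "intro": 1, "beginner": 1,
--     "medium": 3, "intermediate": 3, "moderate": 3,
--     "complex": 4, "advanced": 4, "sophisticated": 4, "detailed": 4,
--     "expert": 5, "professional": 5, "production": 5, "enterprise": 5,
-- }
--
-- def _assess_complexity_level(context: str) -> int:
--     """Assess the complexity level of the task (1-5)"""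
--     context_lower = context.lower()
--     scores = [s for w, s in _LEVEL_SCORES.items() if w in context_lower]
--     return min(scores) if scores else 2
-- ===== Notes on version B (the rewrite author's own statement) =====
-- stated objective: simpler
-- what changed: Replaced the ordered four-group loop with early returns and a per-level if/elif chain by one flat word-to-score table, a single comprehension collecting the scores of matching words, and min with default 2 (correct because the group order coincides with ascending scores).
import Mathlib
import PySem

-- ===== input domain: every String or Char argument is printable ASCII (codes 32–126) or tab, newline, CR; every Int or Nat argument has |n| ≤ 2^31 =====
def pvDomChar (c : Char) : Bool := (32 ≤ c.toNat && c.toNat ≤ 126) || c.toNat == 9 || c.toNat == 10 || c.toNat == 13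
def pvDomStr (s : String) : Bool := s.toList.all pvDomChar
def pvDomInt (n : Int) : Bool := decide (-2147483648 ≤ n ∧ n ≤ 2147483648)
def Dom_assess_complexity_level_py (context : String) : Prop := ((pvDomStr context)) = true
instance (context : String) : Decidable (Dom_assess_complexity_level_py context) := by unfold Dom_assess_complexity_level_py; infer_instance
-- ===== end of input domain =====

-- B replaces A's ordered early-return loop over four keyword groups by one flat
-- word→score table and a min (default 2) over the scores of all matching words (objective: simpler).

-- ===== PORT A =====
-- A's dict literal, as an insertion-ordered association list
def pvIndicatorsA : List (String × List String) :=
  [("basic", ["simple", "basic", "easy", "intro", "beginner"]),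
   ("intermediate", ["medium", "intermediate", "moderate"]),
   ("advanced", ["complex", "advanced", "sophisticated", "detailed"]),
   ("expert", ["expert", "professional", "production", "enterprise"])]

-- the 'for level, indicators in …' loop with its early returns; falling off the
-- if/elif chain (no return) continues the loop, as in Python
def pvALoop (cl : String) : List (String × List String) → Int
  | [] => 2
  | (level, indicators) :: rest =>
    if indicators.any (fun indicator => PySem.Str.isIn indicator cl) then
      if level == "basic" then 1
      else if level == "intermediate" then 3
      else if level == "advanced" then 4
      else if level == "expert" then 5
      else pvALoop cl rest
    else pvALoop cl rest

def assess_complexity_level_py (context : String) : Int :=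
  pvALoop (PySem.Str.lower context) pvIndicatorsA

-- ===== PORT B =====
-- B's flat word→score dict, as an insertion-ordered association list
def pvLevelScores : List (String × Int) :=
  [("simple", 1), ("basic", 1), ("easy", 1), ("intro", 1), ("beginner", 1),
   ("medium", 3), ("intermediate", 3), ("moderate", 3),
   ("complex", 4), ("advanced", 4), ("sophisticated", 4), ("detailed", 4),
   ("expert", 5), ("professional", 5), ("production", 5), ("enterprise", 5)]

-- Python's 'min(scores) if scores else 2'
def pvMinScores : List Int → Int
  | [] => 2
  | x :: xs => xs.foldl min x

def assess_complexity_level_py_alt (context : String) : Int :=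
  let context_lower := PySem.Str.lower context
  let scores := pvLevelScores.filterMap
    (fun p => if PySem.Str.isIn p.1 context_lower then some p.2 else none)
  pvMinScores scores

-- ===== PRECONDITION & SPEC =====
def Spec_assess_complexity_level_py (context : String) (out : Int) : Prop := out = assess_complexity_level_py_alt context
instance (context : String) (out : Int) : Decidable (Spec_assess_complexity_level_py context out) := by unfold Spec_assess_complexity_level_py; infer_instance

-- ===== CLAIM (what is proved, stated in full; the proofs are below) =====
def Claim_equal_assess_complexity_level_py : Prop := ∀ (context : String), Dom_assess_complexity_level_py context → Spec_assess_complexity_level_py context (assess_complexity_level_py context)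

-- ===== LEMMAS AND PROOFS =====

-- the matched-score list of B, abstracted over the word→score table
def pvFM (cl : String) (l : List (String × Int)) : List Int :=
  l.filterMap (fun p => if PySem.Str.isIn p.1 cl then some p.2 else none)

theorem pvFM_cons_neg {cl w : String} {s : Int} {l : List (String × Int)}
    (h : PySem.Str.isIn w cl = false) : pvFM cl ((w, s) :: l) = pvFM cl l := by
  have h' : PySem.Chars.isIn w.toList cl.toList = false := by simpa using h
  simp [pvFM, h']

theorem pvFM_mem {cl w : String} {s : Int} {l : List (String × Int)}
    (h : PySem.Str.isIn w cl = true) (hm : (w, s) ∈ l) : s ∈ pvFM cl l :=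
  List.mem_filterMap.mpr ⟨(w, s), hm, by
    have h' : PySem.Chars.isIn w.toList cl.toList = true := by simpa using h
    simp [h']⟩

theorem pvFM_lb {cl : String} {l : List (String × Int)} {a : Int}
    (h : ∀ p ∈ l, a ≤ p.2) : ∀ y ∈ pvFM cl l, a ≤ y := by
  intro y hy
  obtain ⟨p, hp, hfp⟩ := List.mem_filterMap.mp hy
  rcases ite_eq_iff.mp hfp with ⟨hc, hs⟩ | ⟨hc, hs⟩
  · cases hs; exact h p hp
  · cases hs

theorem pvMinScores_eq {l : List Int} {a : Int}
    (hmem : a ∈ l) (hlb : ∀ y ∈ l, a ≤ y) : pvMinScores l = a := by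
  cases l with
  | nil => cases hmem
  | cons x xs =>
    show xs.foldl min x = a
    apply le_antisymm
    · rcases List.mem_cons.mp hmem with h | hx
      · rw [h]; exact (PySem.List.foldl_min_le xs x).1
      · exact (PySem.List.foldl_min_le xs x).2 a hx
    · rcases PySem.List.foldl_min_mem xs x with h | h
      · rw [h]; exact hlb x List.mem_cons_self
      · exact hlb _ (List.mem_cons_of_mem _ h)

theorem pvMinFM {cl : String} {l : List (String × Int)} {a : Int} (w : String)
    (hw : PySem.Str.isIn w cl = true) (hm : (w, a) ∈ l)
    (hlb : ∀ p ∈ l, a ≤ p.2) : pvMinScores (pvFM cl l) = a :=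
  pvMinScores_eq (pvFM_mem hw hm) (pvFM_lb hlb)

theorem pvALoop_eval (cl : String) : pvALoop cl pvIndicatorsA =
    if PySem.Str.isIn "simple" cl || PySem.Str.isIn "basic" cl || PySem.Str.isIn "easy" cl
       || PySem.Str.isIn "intro" cl || PySem.Str.isIn "beginner" cl then 1
    else if PySem.Str.isIn "medium" cl || PySem.Str.isIn "intermediate" cl
       || PySem.Str.isIn "moderate" cl then 3
    else if PySem.Str.isIn "complex" cl || PySem.Str.isIn "advanced" cl
       || PySem.Str.isIn "sophisticated" cl || PySem.Str.isIn "detailed" cl then 4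
    else if PySem.Str.isIn "expert" cl || PySem.Str.isIn "professional" cl
       || PySem.Str.isIn "production" cl || PySem.Str.isIn "enterprise" cl then 5
    else 2 := by
  simp [pvALoop, pvIndicatorsA, List.any, Bool.or_assoc]

theorem pvMain (cl : String) : pvALoop cl pvIndicatorsA = pvMinScores (pvFM cl pvLevelScores) := by
  rw [pvALoop_eval]
  by_cases h1 : (PySem.Str.isIn "simple" cl || PySem.Str.isIn "basic" cl || PySem.Str.isIn "easy" cl
       || PySem.Str.isIn "intro" cl || PySem.Str.isIn "beginner" cl) = true
  · rw [if_pos h1]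
    have hlb : ∀ p ∈ pvLevelScores, (1:Int) ≤ p.2 := by decide
    simp only [Bool.or_eq_true] at h1
    rcases h1 with ((((h|h)|h)|h)|h) <;>
      exact (pvMinFM _ h (by simp [pvLevelScores]) hlb).symm
  · rw [if_neg h1]
    simp only [Bool.or_eq_true, not_or, Bool.not_eq_true] at h1
    obtain ⟨⟨⟨⟨hs1, hs2⟩, hs3⟩, hs4⟩, hs5⟩ := h1
    have hdrop : pvFM cl pvLevelScores = pvFM cl
        [("medium", 3), ("intermediate", 3), ("moderate", 3),
         ("complex", 4), ("advanced", 4), ("sophisticated", 4), ("detailed", 4),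
         ("expert", 5), ("professional", 5), ("production", 5), ("enterprise", 5)] := by
      rw [pvLevelScores, pvFM_cons_neg hs1, pvFM_cons_neg hs2, pvFM_cons_neg hs3,
          pvFM_cons_neg hs4, pvFM_cons_neg hs5]
    rw [hdrop]
    by_cases h2 : (PySem.Str.isIn "medium" cl || PySem.Str.isIn "intermediate" cl
       || PySem.Str.isIn "moderate" cl) = true
    · rw [if_pos h2]
      have hlb : ∀ p ∈ [(("medium":String), (3:Int)), ("intermediate", 3), ("moderate", 3),
         ("complex", 4), ("advanced", 4), ("sophisticated", 4), ("detailed", 4),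
         ("expert", 5), ("professional", 5), ("production", 5), ("enterprise", 5)], (3:Int) ≤ p.2 := by decide
      simp only [Bool.or_eq_true] at h2
      rcases h2 with ((h|h)|h) <;> exact (pvMinFM _ h (by simp) hlb).symm
    · rw [if_neg h2]
      simp only [Bool.or_eq_true, not_or, Bool.not_eq_true] at h2
      obtain ⟨⟨hm1, hm2⟩, hm3⟩ := h2
      rw [pvFM_cons_neg hm1, pvFM_cons_neg hm2, pvFM_cons_neg hm3]
      by_cases h3 : (PySem.Str.isIn "complex" cl || PySem.Str.isIn "advanced" cl
         || PySem.Str.isIn "sophisticated" cl || PySem.Str.isIn "detailed" cl) = true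
      · rw [if_pos h3]
        have hlb : ∀ p ∈ [(("complex":String), (4:Int)), ("advanced", 4), ("sophisticated", 4), ("detailed", 4),
           ("expert", 5), ("professional", 5), ("production", 5), ("enterprise", 5)], (4:Int) ≤ p.2 := by decide
        simp only [Bool.or_eq_true] at h3
        rcases h3 with (((h|h)|h)|h) <;> exact (pvMinFM _ h (by simp) hlb).symm
      · rw [if_neg h3]
        simp only [Bool.or_eq_true, not_or, Bool.not_eq_true] at h3
        obtain ⟨⟨⟨ha1, ha2⟩, ha3⟩, ha4⟩ := h3
        rw [pvFM_cons_neg ha1, pvFM_cons_neg ha2, pvFM_cons_neg ha3, pvFM_cons_neg ha4]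
        by_cases h4 : (PySem.Str.isIn "expert" cl || PySem.Str.isIn "professional" cl
           || PySem.Str.isIn "production" cl || PySem.Str.isIn "enterprise" cl) = true
        · rw [if_pos h4]
          have hlb : ∀ p ∈ [(("expert":String), (5:Int)), ("professional", 5), ("production", 5), ("enterprise", 5)], (5:Int) ≤ p.2 := by decide
          simp only [Bool.or_eq_true] at h4
          rcases h4 with (((h|h)|h)|h) <;> exact (pvMinFM _ h (by simp) hlb).symm
        · rw [if_neg h4]
          simp only [Bool.or_eq_true, not_or, Bool.not_eq_true] at h4
          obtain ⟨⟨⟨he1, he2⟩, he3⟩, he4⟩ := h4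
          rw [pvFM_cons_neg he1, pvFM_cons_neg he2, pvFM_cons_neg he3, pvFM_cons_neg he4]
          rfl

-- ===== VERDICT (by name: the statement is the Claim_ definition above) =====
theorem assess_complexity_level_py_spec : Claim_equal_assess_complexity_level_py := by
  intro context _
  show assess_complexity_level_py context = assess_complexity_level_py_alt context
  exact pvMain (PySem.Str.lower context)
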